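-- pv_equiv track=rewrite | github.com/drorlab/atom3d | atom3d/protein-ligand/splitting.py | combine_clusters
-- ===== SOURCE A (Python) =====
-- def combine_clusters(clusters):
--     combined_clusters = {1:[], 2:[], 3:[], 4:[], 5:[], 6:[], 7:[], 8:[]}
--     curr = 9
--     for cluster, pdbs in clusters.items():
--         if len(pdbs) == 1:
--             combined_clusters[1].extend(pdbs)
--         elif len(pdbs) <= 2:
--             combined_clusters[2].extend(pdbs)
--         elif len(pdbs) <= 4:
--             combined_clusters[3].extend(pdbs)
--         elif len(pdbs) <= 6:
--             combined_clusters[4].extend(pdbs)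
--         elif len(pdbs) <= 10:
--             combined_clusters[5].extend(pdbs)
--         elif len(pdbs) <= 20:
--             combined_clusters[6].extend(pdbs)
--         elif len(pdbs) <= 50:
--             combined_clusters[7].extend(pdbs)
--         elif len(pdbs) <= 200:
--             combined_clusters[8].extend(pdbs)
--         else:
--             combined_clusters[curr] = pdbs
--             curr += 1
--     return combined_clusters
-- ===== SOURCE B (Python) =====
-- def combine_clusters(clusters):
--     sizes = list(clusters.values())
--     bins = [(1, 1), (2, 2), (3, 4), (5, 6), (7, 10), (11, 20), (21, 50), (51, 200)]
--     out = {}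
--     for i, (lo, hi) in enumerate(bins):
--         out[i + 1] = [p for pdbs in sizes if lo <= len(pdbs) <= hi for p in pdbs]
--     for j, pdbs in enumerate(pdbs for pdbs in sizes if len(pdbs) > 200):
--         out[9 + j] = pdbs
--     return out
-- ===== Notes on version B (the rewrite author's own statement) =====
-- stated objective: alternative
-- what changed: A's single per-cluster dispatch pass through a 9-way cascade is replaced by staged passes: each of the 8 bins is built by its own filtered-concatenation pass over the cluster value lists, then one final filter pass assigns overflow clusters to keys 9,10,...; correct because the bins' size intervals are disjoint and each pass preserves input order.
import Mathlib
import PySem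

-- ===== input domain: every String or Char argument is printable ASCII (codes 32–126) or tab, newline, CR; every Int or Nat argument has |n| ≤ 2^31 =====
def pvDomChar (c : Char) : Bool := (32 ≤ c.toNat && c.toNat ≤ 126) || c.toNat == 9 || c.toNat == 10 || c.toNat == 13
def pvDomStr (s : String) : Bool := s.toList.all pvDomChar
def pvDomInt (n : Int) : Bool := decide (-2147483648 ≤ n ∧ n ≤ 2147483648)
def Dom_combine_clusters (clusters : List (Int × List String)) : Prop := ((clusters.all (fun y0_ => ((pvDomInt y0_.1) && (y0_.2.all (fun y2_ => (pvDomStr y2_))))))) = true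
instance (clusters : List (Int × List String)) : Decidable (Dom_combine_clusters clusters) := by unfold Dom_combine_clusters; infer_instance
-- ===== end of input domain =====

-- B replaces A's single per-cluster dispatch pass (a 9-way if/elif cascade mutating a dict)
-- by staged passes: one filtered-concatenation pass per size bin, then a final filter pass
-- collecting overflow clusters (objective: alternative; same total cost).

-- ===== PORT A =====
-- loop body of A; combined_clusters[k].extend(pdbs) with k always a present key (1..8) is
-- exactly Dict.modify k [] (· ++ pdbs); combined_clusters[curr] = pdbs is Dict.insert.
def combine_clusters_stepA (st : PySem.Dict Int (List String) × Int) (p : Int × List String) :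
    PySem.Dict Int (List String) × Int :=
  let n : Int := p.2.length
  if n == 1 then (st.1.modify 1 [] (· ++ p.2), st.2)
  else if n ≤ 2 then (st.1.modify 2 [] (· ++ p.2), st.2)
  else if n ≤ 4 then (st.1.modify 3 [] (· ++ p.2), st.2)
  else if n ≤ 6 then (st.1.modify 4 [] (· ++ p.2), st.2)
  else if n ≤ 10 then (st.1.modify 5 [] (· ++ p.2), st.2)
  else if n ≤ 20 then (st.1.modify 6 [] (· ++ p.2), st.2)
  else if n ≤ 50 then (st.1.modify 7 [] (· ++ p.2), st.2)
  else if n ≤ 200 then (st.1.modify 8 [] (· ++ p.2), st.2)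
  else (st.1.insert st.2 p.2, st.2 + 1)

def combine_clusters (clusters : List (Int × List String)) : List (Int × List String) :=
  let init : PySem.Dict Int (List String) :=
    PySem.Dict.ofList [(1, []), (2, []), (3, []), (4, []), (5, []), (6, []), (7, []), (8, [])]
  (clusters.foldl combine_clusters_stepA (init, 9)).1.items

-- ===== PORT B =====
-- B's bins table: the (lo, hi) size interval of each of the 8 fixed bins
def pvBins : List (Int × Int) := [(1, 1), (2, 2), (3, 4), (5, 6), (7, 10), (11, 20), (21, 50), (51, 200)]

-- the per-bin comprehension of B: all pdbs of clusters whose length lies in [lo, hi], concatenated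
def pvFilt (lo hi : Int) (sizes : List (List String)) : List String :=
  (sizes.filter (fun pd => decide (lo ≤ (pd.length : Int)) && decide ((pd.length : Int) ≤ hi))).flatten

-- the final dict of B is built from fresh increasing keys only, so its items are these appends
def combine_clusters_alt (clusters : List (Int × List String)) : List (Int × List String) :=
  let sizes := clusters.map (·.2)
  pvBins.zipIdx.map (fun q => ((q.2 : Int) + 1, pvFilt q.1.1 q.1.2 sizes))
    ++ (sizes.filter (fun pd => decide (200 < (pd.length : Int)))).zipIdx.map
        (fun q => ((9 : Int) + q.2, q.1))

-- ===== PRECONDITION & SPEC =====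
def Spec_combine_clusters (clusters : List (Int × List String)) (out : List (Int × List String)) : Prop := out = combine_clusters_alt clusters
instance (clusters : List (Int × List String)) (out : List (Int × List String)) : Decidable (Spec_combine_clusters clusters out) := by unfold Spec_combine_clusters; infer_instance

-- ===== CLAIM (what is proved, stated in full; the proofs are below) =====
def Claim_equal_combine_clusters : Prop := ∀ (clusters : List (Int × List String)), Dom_combine_clusters clusters → Spec_combine_clusters clusters (combine_clusters clusters)

-- ===== LEMMAS AND PROOFS =====

-- the overflow part of the dict, keys 9, 10, …
def pvTail9 (ov : List (List String)) : List (Int × List String) :=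
  ov.zipIdx.map (fun q => ((9 : Int) + q.2, q.1))

-- the 8 fixed bins, keys 1..8
def pvCore (b0 b1 b2 b3 b4 b5 b6 b7 : List String) : List (Int × List String) :=
  [(1, b0), (2, b1), (3, b2), (4, b3), (5, b4), (6, b5), (7, b6), (8, b7)]

lemma mem_tail9 {p : Int × List String} {ov : List (List String)} (h : p ∈ pvTail9 ov) :
    9 ≤ p.1 ∧ p.1 < 9 + (ov.length : Int) := by
  unfold pvTail9 at h
  rcases List.mem_map.1 h with ⟨⟨a, j⟩, hmem, rfl⟩
  have := (List.mem_zipIdx hmem).2.1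
  simp only
  omega

lemma tail9_map_fixed (ov : List (List String)) (k : Int) (hk : k < 9) (v : List String) :
    (pvTail9 ov).map (fun p => if p.1 == k then (k, v) else p) = pvTail9 ov := by
  conv_rhs => rw [← List.map_id (pvTail9 ov)]
  apply List.map_congr_left
  intro a ha
  have h9 := (mem_tail9 ha).1
  have : (a.1 == k) = false := by simp [BEq.beq]; omega
  simp [this]

lemma tail9_any_false (ov : List (List String)) (k : Int)
    (hk : k < 9 ∨ k = 9 + (ov.length : Int)) :
    (pvTail9 ov).any (fun p => p.1 == k) = false := by
  rw [List.any_eq_false]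
  intro a ha
  have h := mem_tail9 ha
  simp [BEq.beq]
  omega

lemma tail9_append (ov : List (List String)) (p : List String) :
    pvTail9 (ov ++ [p]) = pvTail9 ov ++ [((9 : Int) + ov.length, p)] := by
  unfold pvTail9
  rw [List.zipIdx_append, List.map_append]
  simp

-- modify at a key 1..8 on a state of the invariant shape
lemma modify_core (b0 b1 b2 b3 b4 b5 b6 b7 : List String) (ov : List (List String))
    (k : Int) (hk1 : 1 ≤ k) (hk2 : k ≤ 8) (f : List String → List String) :
    (PySem.Dict.mk (pvCore b0 b1 b2 b3 b4 b5 b6 b7 ++ pvTail9 ov)).modify k [] f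
      = PySem.Dict.mk
          ((pvCore b0 b1 b2 b3 b4 b5 b6 b7).map
              (fun p => if p.1 == k then (k, f p.2) else p) ++ pvTail9 ov) := by
  have hcont : (PySem.Dict.mk (pvCore b0 b1 b2 b3 b4 b5 b6 b7 ++ pvTail9 ov)).contains k = true := by
    simp only [PySem.Dict.contains, PySem.Dict.items, List.any_append, pvCore, List.any_cons,
      List.any_nil, Bool.or_eq_true, beq_iff_eq]
    omega
  have hget : (PySem.Dict.mk (pvCore b0 b1 b2 b3 b4 b5 b6 b7 ++ pvTail9 ov)).getD k []
      = (((pvCore b0 b1 b2 b3 b4 b5 b6 b7).find? (fun p => p.1 == k)).map (fun x => x.2)).getD [] := by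
    simp only [PySem.Dict.getD, PySem.Dict.get?, PySem.Dict.items, List.find?_append]
    have : (pvTail9 ov).find? (fun p => p.1 == k) = none := by
      rw [List.find?_eq_none]
      intro a ha
      have := (mem_tail9 ha).1
      simp [BEq.beq]; omega
    rw [this]
    cases (pvCore b0 b1 b2 b3 b4 b5 b6 b7).find? (fun p => p.1 == k) <;> simp
  simp only [PySem.Dict.modify, PySem.Dict.insert, hcont, if_pos, PySem.Dict.items,
    List.map_append, tail9_map_fixed ov k (by omega)]
  rw [hget]
  congr 1
  simp only [pvCore, List.find?, List.map_cons, List.map_nil]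
  rcases (by omega : k = 1 ∨ k = 2 ∨ k = 3 ∨ k = 4 ∨ k = 5 ∨ k = 6 ∨ k = 7 ∨ k = 8) with
    rfl | rfl | rfl | rfl | rfl | rfl | rfl | rfl <;> simp

-- insert of the fresh key 9 + |ov| appends
lemma insert_fresh (b0 b1 b2 b3 b4 b5 b6 b7 : List String) (ov : List (List String))
    (v : List String) :
    (PySem.Dict.mk (pvCore b0 b1 b2 b3 b4 b5 b6 b7 ++ pvTail9 ov)).insert (9 + (ov.length : Int)) v
      = PySem.Dict.mk (pvCore b0 b1 b2 b3 b4 b5 b6 b7 ++ pvTail9 (ov ++ [v])) := by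
  have hcont : (PySem.Dict.mk (pvCore b0 b1 b2 b3 b4 b5 b6 b7 ++ pvTail9 ov)).contains
      (9 + (ov.length : Int)) = false := by
    simp only [PySem.Dict.contains, PySem.Dict.items, List.any_append, Bool.or_eq_false_iff]
    constructor
    · simp only [pvCore, List.any_cons, List.any_nil, Bool.or_eq_false_iff, beq_eq_false_iff_ne]
      refine ⟨?_, ?_, ?_, ?_, ?_, ?_, ?_, ?_, trivial⟩ <;> omega
    · exact tail9_any_false ov _ (Or.inr rfl)
  simp only [PySem.Dict.insert, hcont, PySem.Dict.items, tail9_append, List.append_assoc]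
  simp

lemma pvFilt_cons_pos (lo hi : Int) (pd : List String) (s : List (List String))
    (h1 : lo ≤ (pd.length : Int)) (h2 : (pd.length : Int) ≤ hi) :
    pvFilt lo hi (pd :: s) = pd ++ pvFilt lo hi s := by
  simp [pvFilt, List.filter_cons, h1, h2]

lemma pvFilt_cons_neg (lo hi : Int) (pd : List String) (s : List (List String))
    (h : ¬ (lo ≤ (pd.length : Int) ∧ (pd.length : Int) ≤ hi)) :
    pvFilt lo hi (pd :: s) = pvFilt lo hi s := by
  have : (decide (lo ≤ (pd.length : Int)) && decide ((pd.length : Int) ≤ hi)) = false := by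
    simp; omega
  simp [pvFilt, List.filter_cons, this]

-- main loop invariant: A's fold, started on a state of the invariant shape, is the
-- per-bin filtered concatenation over the remaining clusters
set_option maxHeartbeats 4000000 in
lemma combine_loopA (cl : List (Int × List String)) :
    ∀ (b0 b1 b2 b3 b4 b5 b6 b7 : List String) (ov : List (List String)),
    cl.foldl combine_clusters_stepA
        (PySem.Dict.mk (pvCore b0 b1 b2 b3 b4 b5 b6 b7 ++ pvTail9 ov), 9 + (ov.length : Int))
      = (PySem.Dict.mk
          (pvCore (b0 ++ pvFilt 1 1 (cl.map (·.2))) (b1 ++ pvFilt 2 2 (cl.map (·.2)))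
                  (b2 ++ pvFilt 3 4 (cl.map (·.2))) (b3 ++ pvFilt 5 6 (cl.map (·.2)))
                  (b4 ++ pvFilt 7 10 (cl.map (·.2))) (b5 ++ pvFilt 11 20 (cl.map (·.2)))
                  (b6 ++ pvFilt 21 50 (cl.map (·.2))) (b7 ++ pvFilt 51 200 (cl.map (·.2)))
            ++ pvTail9 (ov ++ (cl.map (·.2)).filter (fun pd => decide (200 < (pd.length : Int))))),
         9 + ((ov ++ (cl.map (·.2)).filter (fun pd => decide (200 < (pd.length : Int)))).length : Int)) := by
  induction cl with
  | nil =>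
    intro b0 b1 b2 b3 b4 b5 b6 b7 ov
    simp [pvFilt]
  | cons p rest ih =>
    intro b0 b1 b2 b3 b4 b5 b6 b7 ov
    obtain ⟨k, pd⟩ := p
    simp only [List.foldl_cons, List.map_cons]
    rcases (by omega : pd.length = 0 ∨ pd.length = 1 ∨ pd.length = 2 ∨
        (3 ≤ pd.length ∧ pd.length ≤ 4) ∨ (5 ≤ pd.length ∧ pd.length ≤ 6) ∨
        (7 ≤ pd.length ∧ pd.length ≤ 10) ∨ (11 ≤ pd.length ∧ pd.length ≤ 20) ∨
        (21 ≤ pd.length ∧ pd.length ≤ 50) ∨ (51 ≤ pd.length ∧ pd.length ≤ 200) ∨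
        201 ≤ pd.length) with h | h | h | h | h | h | h | h | h | h
    · -- len = 0: A extends bin 2 with []: no-op; B's filters all exclude pd
      have hpd : pd = [] := List.length_eq_zero_iff.1 (by omega)
      subst hpd
      have hA : combine_clusters_stepA
          (PySem.Dict.mk (pvCore b0 b1 b2 b3 b4 b5 b6 b7 ++ pvTail9 ov), 9 + (ov.length : Int)) (k, [])
          = (PySem.Dict.mk (pvCore b0 b1 b2 b3 b4 b5 b6 b7 ++ pvTail9 ov), 9 + (ov.length : Int)) := by
        simp only [combine_clusters_stepA]
        norm_num
        rw [modify_core b0 b1 b2 b3 b4 b5 b6 b7 ov 2 (by norm_num) (by norm_num)]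
        simp [pvCore]
      rw [hA, ih b0 b1 b2 b3 b4 b5 b6 b7 ov,
        pvFilt_cons_neg 1 1 _ _ (by simp), pvFilt_cons_neg 2 2 _ _ (by simp),
        pvFilt_cons_neg 3 4 _ _ (by simp), pvFilt_cons_neg 5 6 _ _ (by simp),
        pvFilt_cons_neg 7 10 _ _ (by simp), pvFilt_cons_neg 11 20 _ _ (by simp),
        pvFilt_cons_neg 21 50 _ _ (by simp), pvFilt_cons_neg 51 200 _ _ (by simp),
        List.filter_cons]
      simp
    · -- len = 1: bin 1
      have hA : combine_clusters_stepA
          (PySem.Dict.mk (pvCore b0 b1 b2 b3 b4 b5 b6 b7 ++ pvTail9 ov), 9 + (ov.length : Int)) (k, pd)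
          = (PySem.Dict.mk (pvCore (b0 ++ pd) b1 b2 b3 b4 b5 b6 b7 ++ pvTail9 ov), 9 + (ov.length : Int)) := by
        simp only [combine_clusters_stepA]
        simp only [(show (((pd.length : Int)) == 1) = true from by rw [beq_iff_eq]; omega)]
        norm_num
        rw [modify_core b0 b1 b2 b3 b4 b5 b6 b7 ov 1 (by norm_num) (by norm_num)]
        simp [pvCore]
      rw [hA, ih (b0 ++ pd) b1 b2 b3 b4 b5 b6 b7 ov,
        pvFilt_cons_pos 1 1 _ _ (by omega) (by omega), pvFilt_cons_neg 2 2 _ _ (by omega),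
        pvFilt_cons_neg 3 4 _ _ (by omega), pvFilt_cons_neg 5 6 _ _ (by omega),
        pvFilt_cons_neg 7 10 _ _ (by omega), pvFilt_cons_neg 11 20 _ _ (by omega),
        pvFilt_cons_neg 21 50 _ _ (by omega), pvFilt_cons_neg 51 200 _ _ (by omega),
        List.filter_cons]
      split_ifs with hx
      · exfalso; simp at hx; omega
      · simp [List.append_assoc]
    · -- len = 2: bin 2
      have hA : combine_clusters_stepA
          (PySem.Dict.mk (pvCore b0 b1 b2 b3 b4 b5 b6 b7 ++ pvTail9 ov), 9 + (ov.length : Int)) (k, pd)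
          = (PySem.Dict.mk (pvCore b0 (b1 ++ pd) b2 b3 b4 b5 b6 b7 ++ pvTail9 ov), 9 + (ov.length : Int)) := by
        simp only [combine_clusters_stepA]
        simp only [(show (((pd.length : Int)) == 1) = false from by rw [beq_eq_false_iff_ne]; omega),
          (show (((pd.length : Int)) ≤ 2) from by omega)]
        norm_num
        rw [modify_core b0 b1 b2 b3 b4 b5 b6 b7 ov 2 (by norm_num) (by norm_num)]
        simp [pvCore]
      rw [hA, ih b0 (b1 ++ pd) b2 b3 b4 b5 b6 b7 ov,
        pvFilt_cons_neg 1 1 _ _ (by omega), pvFilt_cons_pos 2 2 _ _ (by omega) (by omega),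
        pvFilt_cons_neg 3 4 _ _ (by omega), pvFilt_cons_neg 5 6 _ _ (by omega),
        pvFilt_cons_neg 7 10 _ _ (by omega), pvFilt_cons_neg 11 20 _ _ (by omega),
        pvFilt_cons_neg 21 50 _ _ (by omega), pvFilt_cons_neg 51 200 _ _ (by omega),
        List.filter_cons]
      split_ifs with hx
      · exfalso; simp at hx; omega
      · simp [List.append_assoc]
    · -- 3 ≤ len ≤ 4: bin 3
      have hA : combine_clusters_stepA
          (PySem.Dict.mk (pvCore b0 b1 b2 b3 b4 b5 b6 b7 ++ pvTail9 ov), 9 + (ov.length : Int)) (k, pd)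
          = (PySem.Dict.mk (pvCore b0 b1 (b2 ++ pd) b3 b4 b5 b6 b7 ++ pvTail9 ov), 9 + (ov.length : Int)) := by
        simp only [combine_clusters_stepA]
        simp only [(show (((pd.length : Int)) == 1) = false from by rw [beq_eq_false_iff_ne]; omega),
          (show ¬(((pd.length : Int)) ≤ 2) from by omega), (show (((pd.length : Int)) ≤ 4) from by omega)]
        norm_num
        rw [modify_core b0 b1 b2 b3 b4 b5 b6 b7 ov 3 (by norm_num) (by norm_num)]
        simp [pvCore]
      rw [hA, ih b0 b1 (b2 ++ pd) b3 b4 b5 b6 b7 ov,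
        pvFilt_cons_neg 1 1 _ _ (by omega), pvFilt_cons_neg 2 2 _ _ (by omega),
        pvFilt_cons_pos 3 4 _ _ (by omega) (by omega), pvFilt_cons_neg 5 6 _ _ (by omega),
        pvFilt_cons_neg 7 10 _ _ (by omega), pvFilt_cons_neg 11 20 _ _ (by omega),
        pvFilt_cons_neg 21 50 _ _ (by omega), pvFilt_cons_neg 51 200 _ _ (by omega),
        List.filter_cons]
      split_ifs with hx
      · exfalso; simp at hx; omega
      · simp [List.append_assoc]
    · -- 5 ≤ len ≤ 6: bin 4
      have hA : combine_clusters_stepA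
          (PySem.Dict.mk (pvCore b0 b1 b2 b3 b4 b5 b6 b7 ++ pvTail9 ov), 9 + (ov.length : Int)) (k, pd)
          = (PySem.Dict.mk (pvCore b0 b1 b2 (b3 ++ pd) b4 b5 b6 b7 ++ pvTail9 ov), 9 + (ov.length : Int)) := by
        simp only [combine_clusters_stepA]
        simp only [(show (((pd.length : Int)) == 1) = false from by rw [beq_eq_false_iff_ne]; omega),
          (show ¬(((pd.length : Int)) ≤ 2) from by omega), (show ¬(((pd.length : Int)) ≤ 4) from by omega),
          (show (((pd.length : Int)) ≤ 6) from by omega)]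
        norm_num
        rw [modify_core b0 b1 b2 b3 b4 b5 b6 b7 ov 4 (by norm_num) (by norm_num)]
        simp [pvCore]
      rw [hA, ih b0 b1 b2 (b3 ++ pd) b4 b5 b6 b7 ov,
        pvFilt_cons_neg 1 1 _ _ (by omega), pvFilt_cons_neg 2 2 _ _ (by omega),
        pvFilt_cons_neg 3 4 _ _ (by omega), pvFilt_cons_pos 5 6 _ _ (by omega) (by omega),
        pvFilt_cons_neg 7 10 _ _ (by omega), pvFilt_cons_neg 11 20 _ _ (by omega),
        pvFilt_cons_neg 21 50 _ _ (by omega), pvFilt_cons_neg 51 200 _ _ (by omega),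
        List.filter_cons]
      split_ifs with hx
      · exfalso; simp at hx; omega
      · simp [List.append_assoc]
    · -- 7 ≤ len ≤ 10: bin 5
      have hA : combine_clusters_stepA
          (PySem.Dict.mk (pvCore b0 b1 b2 b3 b4 b5 b6 b7 ++ pvTail9 ov), 9 + (ov.length : Int)) (k, pd)
          = (PySem.Dict.mk (pvCore b0 b1 b2 b3 (b4 ++ pd) b5 b6 b7 ++ pvTail9 ov), 9 + (ov.length : Int)) := by
        simp only [combine_clusters_stepA]
        simp only [(show (((pd.length : Int)) == 1) = false from by rw [beq_eq_false_iff_ne]; omega),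
          (show ¬(((pd.length : Int)) ≤ 2) from by omega), (show ¬(((pd.length : Int)) ≤ 4) from by omega),
          (show ¬(((pd.length : Int)) ≤ 6) from by omega), (show (((pd.length : Int)) ≤ 10) from by omega)]
        norm_num
        rw [modify_core b0 b1 b2 b3 b4 b5 b6 b7 ov 5 (by norm_num) (by norm_num)]
        simp [pvCore]
      rw [hA, ih b0 b1 b2 b3 (b4 ++ pd) b5 b6 b7 ov,
        pvFilt_cons_neg 1 1 _ _ (by omega), pvFilt_cons_neg 2 2 _ _ (by omega),
        pvFilt_cons_neg 3 4 _ _ (by omega), pvFilt_cons_neg 5 6 _ _ (by omega),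
        pvFilt_cons_pos 7 10 _ _ (by omega) (by omega), pvFilt_cons_neg 11 20 _ _ (by omega),
        pvFilt_cons_neg 21 50 _ _ (by omega), pvFilt_cons_neg 51 200 _ _ (by omega),
        List.filter_cons]
      split_ifs with hx
      · exfalso; simp at hx; omega
      · simp [List.append_assoc]
    · -- 11 ≤ len ≤ 20: bin 6
      have hA : combine_clusters_stepA
          (PySem.Dict.mk (pvCore b0 b1 b2 b3 b4 b5 b6 b7 ++ pvTail9 ov), 9 + (ov.length : Int)) (k, pd)
          = (PySem.Dict.mk (pvCore b0 b1 b2 b3 b4 (b5 ++ pd) b6 b7 ++ pvTail9 ov), 9 + (ov.length : Int)) := by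
        simp only [combine_clusters_stepA]
        simp only [(show (((pd.length : Int)) == 1) = false from by rw [beq_eq_false_iff_ne]; omega),
          (show ¬(((pd.length : Int)) ≤ 2) from by omega), (show ¬(((pd.length : Int)) ≤ 4) from by omega),
          (show ¬(((pd.length : Int)) ≤ 6) from by omega), (show ¬(((pd.length : Int)) ≤ 10) from by omega),
          (show (((pd.length : Int)) ≤ 20) from by omega)]
        norm_num
        rw [modify_core b0 b1 b2 b3 b4 b5 b6 b7 ov 6 (by norm_num) (by norm_num)]
        simp [pvCore]
      rw [hA, ih b0 b1 b2 b3 b4 (b5 ++ pd) b6 b7 ov,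
        pvFilt_cons_neg 1 1 _ _ (by omega), pvFilt_cons_neg 2 2 _ _ (by omega),
        pvFilt_cons_neg 3 4 _ _ (by omega), pvFilt_cons_neg 5 6 _ _ (by omega),
        pvFilt_cons_neg 7 10 _ _ (by omega), pvFilt_cons_pos 11 20 _ _ (by omega) (by omega),
        pvFilt_cons_neg 21 50 _ _ (by omega), pvFilt_cons_neg 51 200 _ _ (by omega),
        List.filter_cons]
      split_ifs with hx
      · exfalso; simp at hx; omega
      · simp [List.append_assoc]
    · -- 21 ≤ len ≤ 50: bin 7
      have hA : combine_clusters_stepA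
          (PySem.Dict.mk (pvCore b0 b1 b2 b3 b4 b5 b6 b7 ++ pvTail9 ov), 9 + (ov.length : Int)) (k, pd)
          = (PySem.Dict.mk (pvCore b0 b1 b2 b3 b4 b5 (b6 ++ pd) b7 ++ pvTail9 ov), 9 + (ov.length : Int)) := by
        simp only [combine_clusters_stepA]
        simp only [(show (((pd.length : Int)) == 1) = false from by rw [beq_eq_false_iff_ne]; omega),
          (show ¬(((pd.length : Int)) ≤ 2) from by omega), (show ¬(((pd.length : Int)) ≤ 4) from by omega),
          (show ¬(((pd.length : Int)) ≤ 6) from by omega), (show ¬(((pd.length : Int)) ≤ 10) from by omega),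
          (show ¬(((pd.length : Int)) ≤ 20) from by omega), (show (((pd.length : Int)) ≤ 50) from by omega)]
        norm_num
        rw [modify_core b0 b1 b2 b3 b4 b5 b6 b7 ov 7 (by norm_num) (by norm_num)]
        simp [pvCore]
      rw [hA, ih b0 b1 b2 b3 b4 b5 (b6 ++ pd) b7 ov,
        pvFilt_cons_neg 1 1 _ _ (by omega), pvFilt_cons_neg 2 2 _ _ (by omega),
        pvFilt_cons_neg 3 4 _ _ (by omega), pvFilt_cons_neg 5 6 _ _ (by omega),
        pvFilt_cons_neg 7 10 _ _ (by omega), pvFilt_cons_neg 11 20 _ _ (by omega),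
        pvFilt_cons_pos 21 50 _ _ (by omega) (by omega), pvFilt_cons_neg 51 200 _ _ (by omega),
        List.filter_cons]
      split_ifs with hx
      · exfalso; simp at hx; omega
      · simp [List.append_assoc]
    · -- 51 ≤ len ≤ 200: bin 8
      have hA : combine_clusters_stepA
          (PySem.Dict.mk (pvCore b0 b1 b2 b3 b4 b5 b6 b7 ++ pvTail9 ov), 9 + (ov.length : Int)) (k, pd)
          = (PySem.Dict.mk (pvCore b0 b1 b2 b3 b4 b5 b6 (b7 ++ pd) ++ pvTail9 ov), 9 + (ov.length : Int)) := by
        simp only [combine_clusters_stepA]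
        simp only [(show (((pd.length : Int)) == 1) = false from by rw [beq_eq_false_iff_ne]; omega),
          (show ¬(((pd.length : Int)) ≤ 2) from by omega), (show ¬(((pd.length : Int)) ≤ 4) from by omega),
          (show ¬(((pd.length : Int)) ≤ 6) from by omega), (show ¬(((pd.length : Int)) ≤ 10) from by omega),
          (show ¬(((pd.length : Int)) ≤ 20) from by omega), (show ¬(((pd.length : Int)) ≤ 50) from by omega),
          (show (((pd.length : Int)) ≤ 200) from by omega)]
        norm_num
        rw [modify_core b0 b1 b2 b3 b4 b5 b6 b7 ov 8 (by norm_num) (by norm_num)]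
        simp [pvCore]
      rw [hA, ih b0 b1 b2 b3 b4 b5 b6 (b7 ++ pd) ov,
        pvFilt_cons_neg 1 1 _ _ (by omega), pvFilt_cons_neg 2 2 _ _ (by omega),
        pvFilt_cons_neg 3 4 _ _ (by omega), pvFilt_cons_neg 5 6 _ _ (by omega),
        pvFilt_cons_neg 7 10 _ _ (by omega), pvFilt_cons_neg 11 20 _ _ (by omega),
        pvFilt_cons_neg 21 50 _ _ (by omega), pvFilt_cons_pos 51 200 _ _ (by omega) (by omega),
        List.filter_cons]
      split_ifs with hx
      · exfalso; simp at hx; omega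
      · simp [List.append_assoc]
    · -- len ≥ 201: overflow, fresh key 9 + |ov|
      have hA : combine_clusters_stepA
          (PySem.Dict.mk (pvCore b0 b1 b2 b3 b4 b5 b6 b7 ++ pvTail9 ov), 9 + (ov.length : Int)) (k, pd)
          = (PySem.Dict.mk (pvCore b0 b1 b2 b3 b4 b5 b6 b7 ++ pvTail9 (ov ++ [pd])),
             9 + ((ov ++ [pd]).length : Int)) := by
        simp only [combine_clusters_stepA]
        simp only [(show (((pd.length : Int)) == 1) = false from by rw [beq_eq_false_iff_ne]; omega),
          (show ¬(((pd.length : Int)) ≤ 2) from by omega), (show ¬(((pd.length : Int)) ≤ 4) from by omega),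
          (show ¬(((pd.length : Int)) ≤ 6) from by omega), (show ¬(((pd.length : Int)) ≤ 10) from by omega),
          (show ¬(((pd.length : Int)) ≤ 20) from by omega), (show ¬(((pd.length : Int)) ≤ 50) from by omega),
          (show ¬(((pd.length : Int)) ≤ 200) from by omega)]
        norm_num
        rw [insert_fresh]
        constructor
        · rfl
        · push_cast; ring
      rw [hA, ih b0 b1 b2 b3 b4 b5 b6 b7 (ov ++ [pd]),
        pvFilt_cons_neg 1 1 _ _ (by omega), pvFilt_cons_neg 2 2 _ _ (by omega),
        pvFilt_cons_neg 3 4 _ _ (by omega), pvFilt_cons_neg 5 6 _ _ (by omega),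
        pvFilt_cons_neg 7 10 _ _ (by omega), pvFilt_cons_neg 11 20 _ _ (by omega),
        pvFilt_cons_neg 21 50 _ _ (by omega), pvFilt_cons_neg 51 200 _ _ (by omega),
        List.filter_cons]
      split_ifs with hx
      · simp [List.append_assoc]
      · exfalso; simp at hx; omega

-- ===== VERDICT (by name: the statement is the Claim_ definition above) =====
theorem combine_clusters_spec : Claim_equal_combine_clusters := by
  intro clusters _
  unfold Spec_combine_clusters
  have h0 : combine_clusters clusters
      = (List.foldl combine_clusters_stepA
          (PySem.Dict.mk (pvCore [] [] [] [] [] [] [] [] ++ pvTail9 []),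
           9 + (([] : List (List String)).length : Int)) clusters).1.items := rfl
  rw [h0, combine_loopA clusters [] [] [] [] [] [] [] [] []]
  simp only [PySem.Dict.items, List.nil_append]
  unfold combine_clusters_alt
  simp [pvBins, pvCore, pvTail9, List.zipIdx]
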